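-- pv_equiv track=rewrite | github.com/mwouts/jupytext | src/jupytext/cell_to_text.py | three_backticks_or_more
-- ===== SOURCE A (Python) =====
-- def three_backticks_or_more(lines):
--     """Return a string with enough backticks to encapsulate the given code cell in Markdown
--     cf. https://github.com/mwouts/jupytext/issues/712"""
--     code_cell_delimiter = "```"
--     for line in lines:
--         if not line.startswith(code_cell_delimiter):
--             continue
--         for char in line[len(code_cell_delimiter) :]:
--             if char != "`":
--                 break
--             code_cell_delimiter += "`"
--         code_cell_delimiter += "`"
--
--     return code_cell_delimiter
-- ===== SOURCE B (Python) =====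
-- def three_backticks_or_more(lines):
--     """Return a string with enough backticks to encapsulate the given code cell in Markdown
--     cf. https://github.com/mwouts/jupytext/issues/712"""
--     n = 3
--     while any(line.startswith("`" * n) for line in lines):
--         n += 1
--     return "`" * n
-- ===== Notes on version B (the rewrite author's own statement) =====
-- stated objective: simpler
-- what changed: Replaces A's single-pass stateful growing-delimiter scan with a least-sufficient-fence search: starting at n=3, repeatedly rescan all lines asking whether any still starts with n backticks, incrementing n until none does.
import Mathlib
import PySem

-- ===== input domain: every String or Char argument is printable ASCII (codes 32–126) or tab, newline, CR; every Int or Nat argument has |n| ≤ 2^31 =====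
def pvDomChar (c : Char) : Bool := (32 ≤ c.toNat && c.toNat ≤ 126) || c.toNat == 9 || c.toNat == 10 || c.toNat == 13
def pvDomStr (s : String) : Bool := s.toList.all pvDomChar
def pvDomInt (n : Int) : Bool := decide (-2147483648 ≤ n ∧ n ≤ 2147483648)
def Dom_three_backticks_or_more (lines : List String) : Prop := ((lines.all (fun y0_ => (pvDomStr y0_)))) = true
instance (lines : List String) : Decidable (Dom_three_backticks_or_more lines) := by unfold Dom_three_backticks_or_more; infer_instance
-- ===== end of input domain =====

-- B replaces A's single-pass growing-delimiter scan with a least-sufficient-fence search: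
-- starting at n=3, rescan all lines until none starts with n backticks (objective: simpler).
-- ===== PORT A =====
-- inner 'for char in line[len(delim):]: if char != "`": break; delim += "`"'
def pvGrowA (cs : List Char) (delim : List Char) : List Char :=
  match cs with
  | [] => delim
  | c :: rest => if c ≠ '`' then delim else pvGrowA rest (delim ++ ['`'])

-- body of A's 'for line in lines' loop
def pvStepA (delim : List Char) (line : String) : List Char :=
  if ¬ PySem.Chars.startswith line.toList delim then delim
  else pvGrowA (PySem.Chars.slice line.toList (some (delim.length : Int)) none) delim ++ ['`']

def three_backticks_or_more (lines : List String) : String :=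
  String.ofList (lines.foldl pvStepA ['`', '`', '`'])

-- ===== PORT B =====
-- the while-loop condition: any(line.startswith("`" * n) for line in lines)
def pvAnyStarts (lines : List String) (n : Nat) : Bool :=
  lines.any (fun line => PySem.Chars.startswith line.toList (List.replicate n '`'))

-- (termination helpers for the while loop: the condition forces n ≤ the longest line)
def pvMaxLen (lines : List String) : Nat :=
  lines.foldr (fun l m => max l.toList.length m) 0

theorem pvMem_le_maxLen (lines : List String) (l : String) (h : l ∈ lines) :
    l.toList.length ≤ pvMaxLen lines := by
  induction lines with
  | nil => cases h
  | cons x rest ih =>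
    rcases List.mem_cons.mp h with h | h
    · subst h; simp [pvMaxLen]
    · exact le_trans (ih h) (by simp [pvMaxLen])

theorem pvAnyStarts_le (lines : List String) (n : Nat) (h : pvAnyStarts lines n = true) :
    n ≤ pvMaxLen lines := by
  unfold pvAnyStarts at h
  rw [List.any_eq_true] at h
  obtain ⟨l, hl, hs⟩ := h
  rw [PySem.Chars.startswith_iff] at hs
  have := hs.length_le
  simp only [List.length_replicate] at this
  exact le_trans this (pvMem_le_maxLen lines l hl)

-- 'n = 3; while any(...): n += 1; return "`" * n'
def pvSearch (lines : List String) (n : Nat) : Nat :=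
  if h : pvAnyStarts lines n then pvSearch lines (n + 1) else n
termination_by pvMaxLen lines + 1 - n
decreasing_by have := pvAnyStarts_le lines n h; omega

def three_backticks_or_more_alt (lines : List String) : String :=
  String.ofList (List.replicate (pvSearch lines 3) '`')

-- ===== PRECONDITION & SPEC =====
def Spec_three_backticks_or_more (lines : List String) (out : String) : Prop := out = three_backticks_or_more_alt lines
instance (lines : List String) (out : String) : Decidable (Spec_three_backticks_or_more lines out) := by unfold Spec_three_backticks_or_more; infer_instance

-- ===== CLAIM (what is proved, stated in full; the proofs are below) =====
def Claim_equal_three_backticks_or_more : Prop := ∀ (lines : List String), Dom_three_backticks_or_more lines → Spec_three_backticks_or_more lines (three_backticks_or_more lines)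

-- ===== LEMMAS AND PROOFS =====

-- leading-backtick run length, proof-side characterisation of both sides
def pvRun : List Char → Nat
  | [] => 0
  | c :: rest => if c = '`' then pvRun rest + 1 else 0

def pvBStep (d : Nat) (line : String) : Nat :=
  if 3 ≤ pvRun line.toList then max d (pvRun line.toList + 1) else d

theorem pvGrowA_eq (cs : List Char) (delim : List Char) :
    pvGrowA cs delim = delim ++ List.replicate (pvRun cs) '`' := by
  induction cs generalizing delim with
  | nil => simp [pvGrowA, pvRun]
  | cons c rest ih =>
    by_cases h : c = '`'
    · simp [pvGrowA, pvRun, h, ih, List.replicate_succ]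
    · simp [pvGrowA, pvRun, h]

theorem replicate_prefix_iff (d : Nat) (cs : List Char) :
    List.replicate d '`' <+: cs ↔ d ≤ pvRun cs := by
  induction d generalizing cs with
  | zero => simp
  | succ d ih =>
    cases cs with
    | nil => simp [List.replicate_succ, pvRun]
    | cons c rest =>
      by_cases h : c = '`'
      · simp [List.replicate_succ, pvRun, h, ih]
      · simp [List.replicate_succ, pvRun, h, List.cons_prefix_cons, Ne.symm h]

theorem pvRun_drop (d : Nat) (cs : List Char) (h : d ≤ pvRun cs) :
    pvRun (cs.drop d) = pvRun cs - d := by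
  induction d generalizing cs with
  | zero => simp
  | succ d ih =>
    cases cs with
    | nil => simp [pvRun] at h
    | cons c rest =>
      by_cases hc : c = '`'
      · simp [pvRun, hc] at h ⊢
        rw [ih rest (by omega)]
      · simp [pvRun, hc] at h

theorem pvStepA_eq (d : Nat) (line : String) (hd : 3 ≤ d) :
    pvStepA (List.replicate d '`') line = List.replicate (pvBStep d line) '`' := by
  unfold pvStepA pvBStep
  by_cases h : d ≤ pvRun line.toList
  · have hs : PySem.Chars.startswith line.toList (List.replicate d '`') = true := by
      rw [PySem.Chars.startswith_iff, replicate_prefix_iff]; exact h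
    rw [hs, if_neg (not_not_intro rfl)]
    simp only [List.length_replicate, PySem.List.slice_from_natCast,
      PySem.Chars.slice_eq_listSlice, pvGrowA_eq, pvRun_drop d _ h]
    have h3 : 3 ≤ pvRun line.toList := le_trans hd h
    rw [if_pos h3]
    have : max d (pvRun line.toList + 1) = pvRun line.toList + 1 := by omega
    rw [this, ← List.replicate_add]
    have h2 : d + (pvRun line.toList - d) = pvRun line.toList := by omega
    rw [h2, ← List.replicate_succ']
  · have hs : PySem.Chars.startswith line.toList (List.replicate d '`') = false := by
      rw [Bool.eq_false_iff, Ne, PySem.Chars.startswith_iff, replicate_prefix_iff]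
      omega
    rw [hs]
    simp only [Bool.false_eq_true, not_false_eq_true, if_true]
    split_ifs with h3
    · have : max d (pvRun line.toList + 1) = d := by omega
      rw [this]
    · rfl

theorem foldl_A_eq (lines : List String) (d : Nat) (hd : 3 ≤ d) :
    lines.foldl pvStepA (List.replicate d '`') = List.replicate (lines.foldl pvBStep d) '`' := by
  induction lines generalizing d with
  | nil => rfl
  | cons line rest ih =>
    rw [List.foldl_cons, List.foldl_cons, pvStepA_eq d line hd]
    exact ih (pvBStep d line) (by unfold pvBStep; split_ifs <;> omega)

theorem le_pvBStep (d : Nat) (line : String) : d ≤ pvBStep d line := by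
  unfold pvBStep; split_ifs <;> omega

theorem le_foldl_B (lines : List String) (d : Nat) : d ≤ lines.foldl pvBStep d := by
  induction lines generalizing d with
  | nil => exact le_refl d
  | cons line rest ih =>
    exact le_trans (le_pvBStep d line) (ih (pvBStep d line))

theorem run_lt_foldl_B (lines : List String) (d : Nat) (hd : 3 ≤ d)
    (l : String) (hl : l ∈ lines) : pvRun l.toList < lines.foldl pvBStep d := by
  induction lines generalizing d with
  | nil => cases hl
  | cons line rest ih =>
    rw [List.foldl_cons]
    rcases List.mem_cons.mp hl with h | h
    · subst h
      have h2 := le_foldl_B rest (pvBStep d l)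
      have h1 : pvRun l.toList < pvBStep d l := by
        unfold pvBStep; split_ifs with h3 <;> omega
      omega
    · exact ih (pvBStep d line) (le_trans hd (le_pvBStep d line)) h

theorem foldl_B_attained (lines : List String) (d : Nat) :
    lines.foldl pvBStep d = d ∨
      ∃ l ∈ lines, lines.foldl pvBStep d = pvRun l.toList + 1 := by
  induction lines generalizing d with
  | nil => exact Or.inl rfl
  | cons line rest ih =>
    rw [List.foldl_cons]
    rcases ih (pvBStep d line) with h | ⟨l, hl, h⟩
    · rw [h]
      unfold pvBStep
      split_ifs with h3
      · rcases max_choice d (pvRun line.toList + 1) with hm | hm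
        · exact Or.inl hm
        · exact Or.inr ⟨line, List.mem_cons_self, hm⟩
      · exact Or.inl rfl
    · exact Or.inr ⟨l, List.mem_cons_of_mem _ hl, h⟩

theorem pvAnyStarts_iff (lines : List String) (n : Nat) :
    pvAnyStarts lines n = true ↔ ∃ l ∈ lines, n ≤ pvRun l.toList := by
  simp [pvAnyStarts, List.any_eq_true, PySem.Chars.startswith_iff, replicate_prefix_iff]

theorem pvSearch_eq_aux (lines : List String) (k : Nat) :
    ∀ m, 3 ≤ m → m + k = lines.foldl pvBStep 3 →
      pvSearch lines m = lines.foldl pvBStep 3 := by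
  induction k with
  | zero =>
    intro m hm heq
    rw [pvSearch]
    have hfalse : pvAnyStarts lines m = false := by
      rw [Bool.eq_false_iff, Ne, pvAnyStarts_iff]
      rintro ⟨l, hl, hrun⟩
      have := run_lt_foldl_B lines 3 (le_refl 3) l hl
      omega
    simp [hfalse]
    omega
  | succ k ih =>
    intro m hm heq
    have htrue : pvAnyStarts lines m = true := by
      rw [pvAnyStarts_iff]
      rcases foldl_B_attained lines 3 with h | ⟨l, hl, h⟩
      · omega
      · exact ⟨l, hl, by omega⟩
    rw [pvSearch]
    simp [htrue]
    exact ih (m + 1) (by omega) (by omega)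

-- ===== VERDICT (by name: the statement is the Claim_ definition above) =====
theorem three_backticks_or_more_spec : Claim_equal_three_backticks_or_more := by
  intro lines _
  unfold Spec_three_backticks_or_more three_backticks_or_more three_backticks_or_more_alt
  have hA : ['`', '`', '`'] = List.replicate 3 '`' := rfl
  rw [hA, foldl_A_eq lines 3 (by omega)]
  have hN := le_foldl_B lines 3
  rw [pvSearch_eq_aux lines (lines.foldl pvBStep 3 - 3) 3 (le_refl 3) (by omega)]
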